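-- pv_equiv track=rewrite | github.com/OleksanderSS/trading_project | utils/economic_context_mapper.py | _determine_dominant_regime
-- ===== SOURCE A (Python) =====
-- def _determine_dominant_regime(economic: str, technical: str, psychological: str) -> str:
--     """Визначити домінуючий режим"""
--     regimes = [economic, technical, psychological]
--
--     # Підрахуємо голоси
--     bullish_votes = sum(1 for r in regimes if r == 'bullish' or r == 'optimistic')
--     bearish_votes = sum(1 for r in regimes if r == 'bearish' or r == 'pessimistic')
--
--     if bullish_votes > bearish_votes:
--         return 'bullish'
--     elif bearish_votes > bullish_votes:
--         return 'bearish'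
--     else:
--         return 'neutral'
-- ===== SOURCE B (Python) =====
-- def _determine_dominant_regime(economic: str, technical: str, psychological: str) -> str:
--     def sign(r):
--         if r in ('bullish', 'optimistic'):
--             return '+'
--         if r in ('bearish', 'pessimistic'):
--             return '-'
--         return '0'
--     key = ''.join(sorted(sign(r) for r in (economic, technical, psychological)))
--     table = {'+++': 'bullish', '++-': 'bullish', '++0': 'bullish', '+00': 'bullish',
--              '+--': 'bearish', '---': 'bearish', '--0': 'bearish', '-00': 'bearish'}
--     return table.get(key, 'neutral')
-- ===== Notes on version B (the rewrite author's own statement) =====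
-- stated objective: alternative
-- what changed: Replaces vote counting and comparison entirely: each label is normalized to a sign character, the three signs are sorted into a canonical key string, and the verdict is read off a precomputed 8-entry lookup table with 'neutral' as the default.
import Mathlib
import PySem

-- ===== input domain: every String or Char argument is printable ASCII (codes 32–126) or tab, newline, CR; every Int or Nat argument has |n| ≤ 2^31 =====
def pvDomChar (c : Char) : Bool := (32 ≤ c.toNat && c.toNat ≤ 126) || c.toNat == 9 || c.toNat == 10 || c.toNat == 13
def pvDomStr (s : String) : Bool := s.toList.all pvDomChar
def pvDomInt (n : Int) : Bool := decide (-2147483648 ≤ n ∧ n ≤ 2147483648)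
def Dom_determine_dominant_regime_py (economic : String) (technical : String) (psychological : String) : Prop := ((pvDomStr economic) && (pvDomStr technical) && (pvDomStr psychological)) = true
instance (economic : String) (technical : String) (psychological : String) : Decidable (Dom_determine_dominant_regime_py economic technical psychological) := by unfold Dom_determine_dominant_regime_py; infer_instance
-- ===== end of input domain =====

-- B replaces A's two vote counts with a normalize-sort-lookup: each label becomes a sign
-- character, the sorted signs form a key, and the result is read from an 8-entry table.

-- ===== PORT A =====
def determine_dominant_regime_py (economic : String) (technical : String) (psychological : String) : String :=
  let regimes : List String := [economic, technical, psychological]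
  let bullish_votes : Int :=
    (regimes.map (fun r => if r == "bullish" || r == "optimistic" then (1 : Int) else 0)).sum
  let bearish_votes : Int :=
    (regimes.map (fun r => if r == "bearish" || r == "pessimistic" then (1 : Int) else 0)).sum
  if bullish_votes > bearish_votes then "bullish"
  else if bearish_votes > bullish_votes then "bearish"
  else "neutral"

-- ===== PORT B =====
-- helper 'sign' from Source B: tuple membership is the or-chain of equalities
def pvSignB (r : String) : String :=
  if r == "bullish" || r == "optimistic" then "+"
  else if r == "bearish" || r == "pessimistic" then "-"
  else "0"

def determine_dominant_regime_py_alt (economic : String) (technical : String) (psychological : String) : String :=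
  let key : String :=
    PySem.Str.join "" (PySem.List.sorted [pvSignB economic, pvSignB technical, pvSignB psychological] (fun x => x) false)
  let table : PySem.Dict String String :=
    PySem.Dict.ofList [("+++", "bullish"), ("++-", "bullish"), ("++0", "bullish"), ("+00", "bullish"),
                       ("+--", "bearish"), ("---", "bearish"), ("--0", "bearish"), ("-00", "bearish")]
  table.getD key "neutral"

-- ===== PRECONDITION & SPEC =====
def Spec_determine_dominant_regime_py (economic : String) (technical : String) (psychological : String) (out : String) : Prop := out = determine_dominant_regime_py_alt economic technical psychological
instance (economic : String) (technical : String) (psychological : String) (out : String) : Decidable (Spec_determine_dominant_regime_py economic technical psychological out) := by unfold Spec_determine_dominant_regime_py; infer_instance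

-- ===== CLAIM =====
def Claim_equal_determine_dominant_regime_py : Prop := ∀ (economic : String) (technical : String) (psychological : String), Dom_determine_dominant_regime_py economic technical psychological → Spec_determine_dominant_regime_py economic technical psychological (determine_dominant_regime_py economic technical psychological)

-- ===== LEMMAS AND PROOFS =====

-- each string is one of the four keyword labels or matches none of them
lemma pv_cases3 (r : String) :
    r = "bullish" ∨ r = "optimistic" ∨ r = "bearish" ∨ r = "pessimistic" ∨
    ((r == "bullish") = false ∧ (r == "optimistic") = false ∧
     (r == "bearish") = false ∧ (r == "pessimistic") = false) := by
  by_cases h1 : r = "bullish"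
  · exact Or.inl h1
  by_cases h2 : r = "optimistic"
  · exact Or.inr (Or.inl h2)
  by_cases h3 : r = "bearish"
  · exact Or.inr (Or.inr (Or.inl h3))
  by_cases h4 : r = "pessimistic"
  · exact Or.inr (Or.inr (Or.inr (Or.inl h4)))
  · exact Or.inr (Or.inr (Or.inr (Or.inr ⟨by simp [h1], by simp [h2], by simp [h3], by simp [h4]⟩)))

-- the sign helper takes one of three values
lemma pv_sign_mem (r : String) : pvSignB r = "+" ∨ pvSignB r = "-" ∨ pvSignB r = "0" := by
  unfold pvSignB; split_ifs <;> simp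

-- A's bullish indicator, phrased through the sign helper
lemma pv_bull (r : String) :
    (if r == "bullish" || r == "optimistic" then (1 : Int) else 0) =
    (if pvSignB r == "+" then (1 : Int) else 0) := by
  rcases pv_cases3 r with rfl | rfl | rfl | rfl | ⟨a, b, c, d⟩ <;> simp_all [pvSignB]

-- A's bearish indicator, phrased through the sign helper
lemma pv_bear (r : String) :
    (if r == "bearish" || r == "pessimistic" then (1 : Int) else 0) =
    (if pvSignB r == "-" then (1 : Int) else 0) := by
  rcases pv_cases3 r with rfl | rfl | rfl | rfl | ⟨a, b, c, d⟩ <;> simp_all [pvSignB]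

-- ===== VERDICT =====
set_option maxHeartbeats 4000000 in
theorem determine_dominant_regime_py_spec : Claim_equal_determine_dominant_regime_py := by
  intro e t p hdom
  clear hdom
  unfold Spec_determine_dominant_regime_py determine_dominant_regime_py determine_dominant_regime_py_alt
  simp only [List.map, List.sum_cons, List.sum_nil, pv_bull, pv_bear]
  have he := pv_sign_mem e
  have ht := pv_sign_mem t
  have hp := pv_sign_mem p
  generalize hA : pvSignB e = a at *
  generalize hB : pvSignB t = b at *
  generalize hC : pvSignB p = c at *
  clear hA hB hC
  rcases he with rfl | rfl | rfl <;> rcases ht with rfl | rfl | rfl <;>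
    rcases hp with rfl | rfl | rfl <;>
      · simp [PySem.Dict.ofList, PySem.Dict.getD, PySem.Dict.get?, PySem.Str.join,
          PySem.List.sorted, PySem.List.insertBy, PySem.Chars.join, PySem.Dict.update,
          PySem.Dict.empty, PySem.Dict.insert, PySem.Dict.contains, String.ofList,
          List.find?, List.intercalate]
        decide
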